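-- pv_equiv track=rewrite | github.com/VaggKar/Wiki-Ask | search_engine.py | boolean_retrieval
-- ===== SOURCE A (Python) =====
-- def boolean_retrieval(query_terms, index, operation="AND"):
--     result_docs = set(index.get(query_terms[0], []))  # Start with the first term
--     for term in query_terms[1:]:
--         term_docs = set(index.get(term, []))
--         if operation == "AND":
--             result_docs.intersection_update(term_docs)
--         elif operation == "OR":
--             result_docs.update(term_docs)
--         elif operation == "NOT":
--             result_docs.difference_update(term_docs)
--     return result_docs
-- ===== SOURCE B (Python) =====
-- def boolean_retrieval(query_terms, index, operation="AND"):
--     # Doc-centric: instead of combining posting SETS, test each candidate document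
--     # against the raw posting lists (AND/NOT), or dedup one concatenated list (OR).
--     candidates = list(dict.fromkeys(index.get(query_terms[0], [])))
--     rest = query_terms[1:]
--     if operation == "OR":
--         merged = []
--         for t in query_terms:
--             merged.extend(index.get(t, []))
--         return set(merged)
--     if operation == "AND":
--         return {d for d in candidates if all(d in index.get(t, []) for t in rest)}
--     if operation == "NOT":
--         return {d for d in candidates if not any(d in index.get(t, []) for t in rest)}
--     return set(candidates)
-- ===== Notes on version B (the rewrite author's own statement) =====
-- stated objective: alternative
-- what changed: B is document-centric: for AND/NOT it filters the first term's candidate documents by quantified membership tests (all/not any) against the raw posting lists, and for OR it concatenates all posting lists once and deduplicates, instead of A's term-by-term fold of set intersection/union/difference updates.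
import Mathlib
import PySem

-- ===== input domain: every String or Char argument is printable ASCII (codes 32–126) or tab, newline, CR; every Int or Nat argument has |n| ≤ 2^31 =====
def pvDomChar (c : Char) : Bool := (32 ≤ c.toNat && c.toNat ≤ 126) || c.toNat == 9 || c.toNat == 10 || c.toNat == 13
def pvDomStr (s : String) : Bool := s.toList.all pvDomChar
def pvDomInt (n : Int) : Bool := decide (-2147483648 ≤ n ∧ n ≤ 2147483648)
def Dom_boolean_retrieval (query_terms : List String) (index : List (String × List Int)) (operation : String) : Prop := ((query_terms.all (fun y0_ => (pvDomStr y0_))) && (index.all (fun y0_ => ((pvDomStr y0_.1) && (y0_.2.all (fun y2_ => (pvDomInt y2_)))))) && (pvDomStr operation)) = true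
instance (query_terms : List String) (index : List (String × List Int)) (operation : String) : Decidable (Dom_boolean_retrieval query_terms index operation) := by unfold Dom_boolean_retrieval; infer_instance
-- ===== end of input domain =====

-- B is document-centric: AND/NOT filter the first term's candidate documents by quantified
-- membership in the raw posting lists, OR dedups one concatenated posting list (objective: alternative).

-- ===== PORT A =====
-- A: fold over the remaining terms, re-testing the operation and updating a set accumulator.
def boolean_retrieval (query_terms : List String) (index : List (String × List Int)) (operation : String) : List Int :=
  match query_terms with
  | [] => []  -- query_terms[0] raises IndexError; excluded by Pre_
  | t0 :: rest =>
    rest.foldl (fun result_docs term =>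
      let term_docs := PySem.Set.ofList (PySem.Dict.getD (PySem.Dict.mk index) term [])
      if operation == "AND" then PySem.Set.inter result_docs term_docs
      else if operation == "OR" then PySem.Set.union result_docs term_docs
      else if operation == "NOT" then PySem.Set.diff result_docs term_docs
      else result_docs)
      (PySem.Set.ofList (PySem.Dict.getD (PySem.Dict.mk index) t0 []))

-- ===== PORT B =====
-- B: doc-centric — candidates = dedup of the first posting list; AND/NOT filter candidates by
-- all/not-any membership in the raw posting lists; OR concatenates all posting lists and dedups.
def boolean_retrieval_alt (query_terms : List String) (index : List (String × List Int)) (operation : String) : List Int :=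
  match query_terms with
  | [] => []  -- query_terms[0] raises IndexError; excluded by Pre_
  | t0 :: rest =>
    let postings := fun t => PySem.Dict.getD (PySem.Dict.mk index) t []
    let candidates := PySem.List.dedup (postings t0)
    if operation == "OR" then
      PySem.Set.ofList ((t0 :: rest).foldl (fun merged t => merged ++ postings t) [])
    else if operation == "AND" then
      candidates.filter (fun d => rest.all (fun t => (postings t).contains d))
    else if operation == "NOT" then
      candidates.filter (fun d => !(rest.any (fun t => (postings t).contains d)))
    else candidates

-- ===== PRECONDITION & SPEC =====
-- Pre_ excludes only the empty query, on which A raises IndexError (query_terms[0]).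
def Pre_boolean_retrieval (query_terms : List String) (index : List (String × List Int)) (operation : String) : Prop :=
  query_terms ≠ []
instance (query_terms : List String) (index : List (String × List Int)) (operation : String) : Decidable (Pre_boolean_retrieval query_terms index operation) := by unfold Pre_boolean_retrieval; infer_instance
def pvWitness_boolean_retrieval : List String × (List (String × List Int)) × String :=
  (["a", "b"], [("a", [1, 2]), ("b", [2, 3])], "AND")
def Spec_boolean_retrieval (query_terms : List String) (index : List (String × List Int)) (operation : String) (out : List Int) : Prop := out = boolean_retrieval_alt query_terms index operation
instance (query_terms : List String) (index : List (String × List Int)) (operation : String) (out : List Int) : Decidable (Spec_boolean_retrieval query_terms index operation out) := by unfold Spec_boolean_retrieval; infer_instance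

-- ===== CLAIM (what is proved, stated in full; the proofs are below) =====
def Claim_equal_boolean_retrieval : Prop := ∀ (query_terms : List String) (index : List (String × List Int)) (operation : String), Dom_boolean_retrieval query_terms index operation → Pre_boolean_retrieval query_terms index operation → Spec_boolean_retrieval query_terms index operation (boolean_retrieval query_terms index operation)

-- ===== LEMMAS AND PROOFS =====

-- set(l).contains d has the same value as l.contains d
theorem contains_ofList (l : List Int) (d : Int) :
    (PySem.Set.ofList l).contains d = l.contains d := by
  rw [Bool.eq_iff_iff]
  simp [PySem.Set.mem_ofList]

-- fold of intersections = filter of the start set by membership in every posting list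
theorem foldl_inter_eq_filter (post : String → List Int) (ts : List String) (s : List Int) :
    ts.foldl (fun r t => PySem.Set.inter r (PySem.Set.ofList (post t))) s
      = s.filter (fun d => ts.all (fun t => (post t).contains d)) := by
  induction ts generalizing s with
  | nil => simp
  | cons t ts ih =>
    rw [List.foldl_cons, ih, PySem.Set.inter, List.filter_filter]
    apply List.filter_congr
    intro d _
    simp [Bool.and_comm]

-- fold of differences = filter of the start set by non-membership in every posting list
theorem foldl_diff_eq_filter (post : String → List Int) (ts : List String) (s : List Int) :
    ts.foldl (fun r t => PySem.Set.diff r (PySem.Set.ofList (post t))) s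
      = s.filter (fun d => !(ts.any (fun t => (post t).contains d))) := by
  induction ts generalizing s with
  | nil => simp
  | cons t ts ih =>
    rw [List.foldl_cons, ih, PySem.Set.diff, List.filter_filter]
    apply List.filter_congr
    intro d _
    simp only [List.any_cons, Bool.not_or, contains_ofList]
    rw [Bool.and_comm]

-- update with a deduplicated list = update with the raw list
theorem update_ofList (l : List Int) (s : PySem.Set Int) :
    PySem.Set.update s (PySem.Set.ofList l) = PySem.Set.update s l := by
  induction l using List.reverseRecOn generalizing s with
  | nil => rfl
  | append_singleton xs x ih =>
    rw [PySem.Set.ofList_append_singleton, PySem.Set.update_append]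
    by_cases hx : x ∈ PySem.Set.ofList xs
    · rw [PySem.Set.add_of_mem hx, ih]
      have hx' : x ∈ PySem.Set.update s xs := by
        rw [PySem.Set.mem_update]
        right; exact (PySem.Set.mem_ofList _ _).1 hx
      exact (PySem.Set.add_of_mem hx').symm
    · rw [PySem.Set.add_of_not_mem hx, PySem.Set.update_append, ih]

-- fold of unions = dedup of the concatenation of all posting lists
theorem foldl_union_eq_ofList (post : String → List Int) (ts : List String) (l0 : List Int) :
    ts.foldl (fun r t => PySem.Set.union r (PySem.Set.ofList (post t))) (PySem.Set.ofList l0)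
      = PySem.Set.ofList (ts.foldl (fun merged t => merged ++ post t) l0) := by
  induction ts generalizing l0 with
  | nil => rfl
  | cons t ts ih =>
    have h1 : PySem.Set.union (PySem.Set.ofList l0) (PySem.Set.ofList (post t))
        = PySem.Set.ofList (l0 ++ post t) := by
      show PySem.Set.update (PySem.Set.ofList l0) (PySem.Set.ofList (post t)) = _
      rw [update_ofList, ← PySem.Set.ofList_append]
    simp only [List.foldl_cons, h1]
    exact ih (l0 ++ post t)

-- ===== VERDICT (by name: the statement is the Claim_ definition above) =====
theorem boolean_retrieval_spec : Claim_equal_boolean_retrieval := by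
  intro qs idx op _ hpre
  unfold Spec_boolean_retrieval
  match qs with
  | [] => exact absurd rfl hpre
  | t0 :: rest =>
    by_cases hA : (op == "AND") = true
    · have : (op == "OR") = false := by
        cases h : (op == "OR") <;> simp_all
      simp only [boolean_retrieval, boolean_retrieval_alt, hA, this, if_true, if_false,
        Bool.false_eq_true, PySem.List.dedup_eq_ofList]
      rw [foldl_inter_eq_filter]
    · by_cases hO : (op == "OR") = true
      · simp only [boolean_retrieval, boolean_retrieval_alt, hA, hO, if_true, if_false,
          Bool.false_eq_true]
        rw [foldl_union_eq_ofList]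
        simp
      · by_cases hN : (op == "NOT") = true
        · simp only [boolean_retrieval, boolean_retrieval_alt, hA, hO, hN, if_true, if_false,
            Bool.false_eq_true, PySem.List.dedup_eq_ofList]
          rw [foldl_diff_eq_filter]
        · simp [boolean_retrieval, boolean_retrieval_alt, hA, hO, hN]
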